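-- pv_equiv track=rewrite | github.com/krnets/codewars-practice | 7kyu/Shift Left/kata.py | shift_left
-- ===== SOURCE A (Python) =====
-- def shift_left(a, b):
--     res = 0
--     while a != b:
--         if len(a) > len(b):
--             a = a[1:]
--         else:
--             b = b[1:]
--         res += 1
--     return res
-- ===== SOURCE B (Python) =====
-- def shift_left(a, b):
--     ra, rb = a[::-1], b[::-1]
--     L = 0
--     while L < len(a) and L < len(b) and ra[L] == rb[L]:
--         L += 1
--     return len(a) + len(b) - 2 * L
-- ===== Notes on version B (the rewrite author's own statement) =====
-- stated objective: faster
-- what changed: Instead of simulating the front-removal loop (quadratic in total length because each a[1:]/b[1:] copies the string), B computes the longest common suffix length L with a single scan from the end and returns len(a)+len(b)-2*L.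
import Mathlib
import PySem

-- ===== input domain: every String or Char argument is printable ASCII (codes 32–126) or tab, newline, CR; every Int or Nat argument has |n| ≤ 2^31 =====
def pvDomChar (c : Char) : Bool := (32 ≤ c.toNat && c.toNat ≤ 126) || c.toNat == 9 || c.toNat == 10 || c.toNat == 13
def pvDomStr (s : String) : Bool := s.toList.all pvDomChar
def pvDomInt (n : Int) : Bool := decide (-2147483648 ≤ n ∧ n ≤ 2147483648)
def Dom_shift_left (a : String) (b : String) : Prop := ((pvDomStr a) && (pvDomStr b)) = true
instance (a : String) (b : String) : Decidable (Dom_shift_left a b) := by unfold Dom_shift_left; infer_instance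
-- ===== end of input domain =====

-- B replaces A's front-removal simulation (each a[1:] copies) by one scan from the end
-- computing the longest common suffix length L, returning len(a)+len(b)-2*L (objective: faster).

-- ===== PORT A =====
-- the while loop of A, on the strings' character lists; a[1:] is PySem.List.slice (some 1) none
def shiftLoopA (a b : List Char) (res : Int) : Int :=
  if a = b then res
  else if a.length > b.length then
    shiftLoopA (PySem.List.slice a (some 1) none) b (res + 1)
  else
    shiftLoopA a (PySem.List.slice b (some 1) none) (res + 1)
termination_by a.length + b.length
decreasing_by
  all_goals simp only [PySem.List.slice_from_one, List.length_tail]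
  · rename_i h1 h2; omega
  · rename_i h1 h2
    have hb : b ≠ [] := by
      intro hnil; subst hnil
      simp only [List.length_nil, gt_iff_lt, Nat.not_lt, Nat.le_zero] at h2
      exact h1 (List.length_eq_zero_iff.mp h2)
    have : 0 < b.length := List.length_pos_iff.mpr hb
    omega

def shift_left (a : String) (b : String) : Int :=
  shiftLoopA a.toList b.toList 0

-- ===== PORT B =====
-- Source B reverses both strings and scans the common prefix of the reverses
def prefLen : List Char → List Char → Nat
  | x :: xs, y :: ys => if x = y then prefLen xs ys + 1 else 0
  | _, _ => 0

def shift_left_alt (a : String) (b : String) : Int :=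
  let la := a.toList
  let lb := b.toList
  (la.length : Int) + lb.length - 2 * prefLen la.reverse lb.reverse

-- ===== PRECONDITION & SPEC =====
def Spec_shift_left (a : String) (b : String) (out : Int) : Prop := out = shift_left_alt a b
instance (a : String) (b : String) (out : Int) : Decidable (Spec_shift_left a b out) := by unfold Spec_shift_left; infer_instance

-- ===== CLAIM (what is proved, stated in full; the proofs are below) =====
def Claim_equal_shift_left : Prop := ∀ (a : String) (b : String), Dom_shift_left a b → Spec_shift_left a b (shift_left a b)

-- ===== LEMMAS AND PROOFS =====

theorem prefLen_le_left : ∀ xs ys : List Char, prefLen xs ys ≤ xs.length := by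
  intro xs
  induction xs with
  | nil => intro ys; cases ys <;> simp [prefLen]
  | cons x xs ih =>
    intro ys
    cases ys with
    | nil => simp [prefLen]
    | cons y ys =>
      simp only [prefLen, List.length_cons]
      split
      · exact Nat.succ_le_succ (ih ys)
      · omega

theorem prefLen_le_right : ∀ xs ys : List Char, prefLen xs ys ≤ ys.length := by
  intro xs
  induction xs with
  | nil => intro ys; cases ys <;> simp [prefLen]
  | cons x xs ih =>
    intro ys
    cases ys with
    | nil => simp [prefLen]
    | cons y ys =>
      simp only [prefLen, List.length_cons]
      split
      · exact Nat.succ_le_succ (ih ys)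
      · omega

theorem prefLen_self : ∀ xs : List Char, prefLen xs xs = xs.length := by
  intro xs
  induction xs with
  | nil => simp [prefLen]
  | cons x xs ih => simp [prefLen, ih]

theorem prefLen_eq_of_full : ∀ xs ys : List Char,
    prefLen xs ys = xs.length → prefLen xs ys = ys.length → xs = ys := by
  intro xs
  induction xs with
  | nil =>
    intro ys h1 h2
    cases ys with
    | nil => rfl
    | cons y ys => simp [prefLen] at h2
  | cons x xs ih =>
    intro ys h1 h2
    cases ys with
    | nil => simp [prefLen] at h1
    | cons y ys =>
      simp only [prefLen, List.length_cons] at h1 h2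
      by_cases hxy : x = y
      · simp only [hxy, if_true] at h1 h2
        rw [hxy]
        exact congrArg (y :: ·) (ih ys (by omega) (by omega))
      · simp [hxy] at h1

theorem prefLen_take_left : ∀ (n : Nat) (xs ys : List Char),
    prefLen (xs.take n) ys = min n (prefLen xs ys) := by
  intro n
  induction n with
  | zero => intro xs ys; cases ys <;> simp [prefLen]
  | succ n ih =>
    intro xs ys
    cases xs with
    | nil => cases ys <;> simp [prefLen]
    | cons x xs =>
      cases ys with
      | nil => simp [prefLen]
      | cons y ys =>
        simp only [List.take_succ_cons, prefLen]
        split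
        · rw [ih]; omega
        · simp

theorem prefLen_take_right : ∀ (n : Nat) (xs ys : List Char),
    prefLen xs (ys.take n) = min n (prefLen xs ys) := by
  intro n
  induction n with
  | zero => intro xs ys; cases xs <;> simp [prefLen]
  | succ n ih =>
    intro xs ys
    cases ys with
    | nil => cases xs <;> simp [prefLen]
    | cons y ys =>
      cases xs with
      | nil => simp [prefLen]
      | cons x xs =>
        simp only [List.take_succ_cons, prefLen]
        split
        · rw [ih]; omega
        · simp

theorem reverse_tail_eq_dropLast_reverse (xs : List Char) :
    xs.tail.reverse = xs.reverse.dropLast := by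
  cases xs with
  | nil => rfl
  | cons x xs => simp

-- the loop invariant: A's loop computes res + |a| + |b| - 2·(common suffix length)
theorem shiftLoopA_eq : ∀ (n : Nat) (a b : List Char) (res : Int),
    a.length + b.length ≤ n →
    shiftLoopA a b res =
      res + a.length + b.length - 2 * prefLen a.reverse b.reverse := by
  intro n
  induction n with
  | zero =>
    intro a b res h
    have ha : a = [] := List.length_eq_zero_iff.mp (by omega)
    have hb : b = [] := List.length_eq_zero_iff.mp (by omega)
    subst ha; subst hb
    simp [shiftLoopA, prefLen]
  | succ n ih =>
    intro a b res h
    rw [shiftLoopA]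
    by_cases heq : a = b
    · subst heq
      simp [prefLen_self]
      ring
    · simp only [heq, if_false]
      have hP1 := prefLen_le_left a.reverse b.reverse
      have hP2 := prefLen_le_right a.reverse b.reverse
      simp only [List.length_reverse] at hP1 hP2
      by_cases hlen : a.length > b.length
      · simp only [hlen, if_true, PySem.List.slice_from_one]
        rw [ih a.tail b (res + 1) (by simp [List.length_tail]; omega)]
        rw [reverse_tail_eq_dropLast_reverse, List.dropLast_eq_take,
            List.length_reverse, prefLen_take_left]
        have hmin : min (a.length - 1) (prefLen a.reverse b.reverse)
            = prefLen a.reverse b.reverse := by omega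
        rw [hmin]
        simp only [List.length_tail]
        push_cast [Nat.cast_sub (by omega : 1 ≤ a.length)]
        ring
      · simp only [hlen, if_false, PySem.List.slice_from_one]
        have hble : a.length ≤ b.length := by omega
        have hb : b ≠ [] := by
          intro hnil; subst hnil
          exact heq (List.length_eq_zero_iff.mp (by simpa using hble))
        have hbpos : 0 < b.length := List.length_pos_iff.mpr hb
        -- the common suffix is strictly shorter than b (else a = b)
        have hPlt : prefLen a.reverse b.reverse < b.length := by
          rcases Nat.lt_or_ge (prefLen a.reverse b.reverse) b.length with h' | h'
          · exact h'
          · exfalso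
            have hPb : prefLen a.reverse b.reverse = b.length := by omega
            have hPa : prefLen a.reverse b.reverse = a.length := by omega
            have := prefLen_eq_of_full a.reverse b.reverse
              (by simpa using hPa) (by simpa using hPb)
            exact heq (by simpa using congrArg List.reverse this)
        rw [ih a b.tail (res + 1) (by simp [List.length_tail]; omega)]
        rw [reverse_tail_eq_dropLast_reverse, List.dropLast_eq_take,
            List.length_reverse, prefLen_take_right]
        have hmin : min (b.length - 1) (prefLen a.reverse b.reverse)
            = prefLen a.reverse b.reverse := by omega
        rw [hmin]
        simp only [List.length_tail]
        push_cast [Nat.cast_sub (by omega : 1 ≤ b.length)]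
        ring

-- ===== VERDICT (by name: the statement is the Claim_ definition above) =====
theorem shift_left_spec : Claim_equal_shift_left := by
  intro a b _
  unfold Spec_shift_left shift_left shift_left_alt
  rw [shiftLoopA_eq (a.toList.length + b.toList.length) _ _ _ le_rfl]
  push_cast
  ring
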